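-- pv_equiv track=rewrite | github.com/special-place-administrator/symforge | execution/conventional_commits.py | check_subjects
-- ===== SOURCE A (Python) =====
-- ALLOWED_TYPES = (
--     "build",
--     "chore",
--     "ci",
--     "docs",
--     "feat",
--     "fix",
--     "perf",
--     "refactor",
--     "revert",
--     "style",
--     "test",
-- )
--
-- IGNORED_PREFIXES = (
--     "Merge pull request #",
--     "Merge branch ",
--     "Merge remote-tracking branch ",
-- )
--
-- def is_ignored_subject(subject: str) -> bool:
--     return subject.startswith(IGNORED_PREFIXES)
--
-- def is_conventional_subject(subject: str) -> bool:
--     for commit_type in ALLOWED_TYPES: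
--         if not subject.startswith(commit_type):
--             continue
--
--         remainder = subject[len(commit_type) :]
--         if remainder.startswith("("):
--             closing = remainder.find(")")
--             if closing <= 1:
--                 return False
--             remainder = remainder[closing + 1 :]
--
--         if remainder.startswith("!"):
--             remainder = remainder[1:]
--
--         return remainder.startswith(": ") and len(remainder) > 2
--
--     return False
--
-- def check_subjects(subjects: list[str]) -> list[str]:
--     problems: list[str] = []
--
--     for subject in subjects:
--         if is_ignored_subject(subject):
--             continue
--         if not is_conventional_subject(subject):
--             allowed = ", ".join(ALLOWED_TYPES)
--             problems.append(
--                 f"'{subject}' is not a conventional commit subject. "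
--                 f"Expected one of: {allowed}. Example: fix(ci): describe the change"
--             )
--
--     return problems
-- ===== SOURCE B (Python) =====
-- ALLOWED_TYPES = (
--     "build",
--     "chore",
--     "ci",
--     "docs",
--     "feat",
--     "fix",
--     "perf",
--     "refactor",
--     "revert",
--     "style",
--     "test",
-- )
--
-- IGNORED_PREFIXES = (
--     "Merge pull request #",
--     "Merge branch ",
--     "Merge remote-tracking branch ",
-- )
--
-- _ALLOWED_SET = frozenset(ALLOWED_TYPES)
--
-- _PROBLEM_SUFFIX = (
--     "' is not a conventional commit subject. Expected one of: "
--     "build, chore, ci, docs, feat, fix, perf, refactor, revert, style, test. "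
--     "Example: fix(ci): describe the change"
-- )
--
--
-- def _is_conventional(s: str) -> bool:
--     # One left-to-right scan: lowercase type token, optional non-empty scope,
--     # optional bang, then ": " and at least one more character.
--     n = len(s)
--     i = 0
--     while i < n and "a" <= s[i] <= "z":
--         i += 1
--     if s[:i] not in _ALLOWED_SET:
--         return False
--     if i < n and s[i] == "(":
--         j = i + 1
--         while j < n and s[j] != ")":
--             j += 1
--         if j >= n or j == i + 1:
--             return False
--         i = j + 1
--     if i < n and s[i] == "!":
--         i += 1
--     return s[i : i + 2] == ": " and n > i + 2
--
--
-- def check_subjects(subjects: list[str]) -> list[str]: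
--     return [
--         "'" + subject + _PROBLEM_SUFFIX
--         for subject in subjects
--         if not subject.startswith(IGNORED_PREFIXES) and not _is_conventional(subject)
--     ]
-- ===== Notes on version B (the rewrite author's own statement) =====
-- stated objective: alternative
-- what changed: Replaces the per-type loop (11 startswith tests with repeated slicing and .find) by a single left-to-right index scan that tokenizes the lowercase type run once, checks it against a frozenset, then parses scope/bang/': ' in place without creating substrings; the output loop becomes one comprehension with a precomputed message suffix.
import Mathlib
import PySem

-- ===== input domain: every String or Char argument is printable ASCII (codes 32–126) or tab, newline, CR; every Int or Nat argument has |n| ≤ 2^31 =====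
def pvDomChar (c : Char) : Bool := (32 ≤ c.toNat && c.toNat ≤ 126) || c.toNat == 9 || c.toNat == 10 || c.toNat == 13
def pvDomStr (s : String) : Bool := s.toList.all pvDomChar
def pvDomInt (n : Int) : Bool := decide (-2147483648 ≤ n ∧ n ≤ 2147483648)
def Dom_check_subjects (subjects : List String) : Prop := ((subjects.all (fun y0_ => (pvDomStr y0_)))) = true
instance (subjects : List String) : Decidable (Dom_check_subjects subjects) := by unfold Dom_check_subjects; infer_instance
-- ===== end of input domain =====

-- B replaces A's per-type loop (11 startswith tests with slicing and .find) by one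
-- left-to-right scan: tokenize the lowercase type run, one set-membership test, then
-- parse scope/bang/": " in place; the output loop becomes a single comprehension.

-- ===== PORT A =====
def pvAllowedTypes : List String :=
  ["build", "chore", "ci", "docs", "feat", "fix", "perf", "refactor", "revert", "style", "test"]

def pvIgnoredPrefixes : List String :=
  ["Merge pull request #", "Merge branch ", "Merge remote-tracking branch "]

-- subject.startswith(IGNORED_PREFIXES): a tuple argument means "any of the prefixes"
def is_ignored_subject (subject : String) : Bool :=
  pvIgnoredPrefixes.any (fun p => PySem.Str.startswith subject p)

-- the straight-line code after the scope 'if' of is_conventional_subject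
def pvTailA (rem : List Char) : Bool :=
  let rem2 := if PySem.Chars.startswith rem "!".toList then PySem.List.slice rem (some 1) none else rem
  PySem.Chars.startswith rem2 ": ".toList && decide (2 < PySem.Chars.len rem2)

-- the loop body after 'remainder = subject[len(commit_type):]'
def pvBodyA (rem : List Char) : Bool :=
  if PySem.Chars.startswith rem "(".toList then
    let closing := PySem.Chars.find rem ")".toList
    if closing ≤ 1 then false
    else pvTailA (PySem.List.slice rem (some (closing + 1)) none)
  else pvTailA rem

-- 'for commit_type in ALLOWED_TYPES: …' with early return
def pvConvLoopA (subject : List Char) : List String → Bool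
  | [] => false
  | t :: ts =>
    if !(PySem.Chars.startswith subject t.toList) then pvConvLoopA subject ts
    else pvBodyA (PySem.List.slice subject (some (PySem.Chars.len t.toList)) none)

def is_conventional_subject (subject : String) : Bool :=
  pvConvLoopA subject.toList pvAllowedTypes

def check_subjects (subjects : List String) : List String :=
  subjects.foldl
    (fun problems subject =>
      if is_ignored_subject subject then problems
      else if !(is_conventional_subject subject) then
        problems ++
          ["'" ++ subject ++ "' is not a conventional commit subject. Expected one of: " ++
            PySem.Str.join ", " pvAllowedTypes ++ ". Example: fix(ci): describe the change"]
      else problems)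
    []

-- ===== PORT B =====
def pvAllowedSet : List (List Char) := pvAllowedTypes.map (fun t => t.toList)

def pvProblemSuffix : String :=
  "' is not a conventional commit subject. Expected one of: build, chore, ci, docs, feat, fix, perf, refactor, revert, style, test. Example: fix(ci): describe the change"

-- s[i:i+2] == ": " and n > i + 2
def pvAltColon : List Char → Bool
  | ':' :: ' ' :: _ :: _ => true
  | _ => false

-- optional '!' then the ": " check
def pvAltTail : List Char → Bool
  | '!' :: r => pvAltColon r
  | r => pvAltColon r

-- optional non-empty ')'-free scope, then the tail
def pvAltAfter : List Char → Bool
  | '(' :: r =>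
    (let scope := r.takeWhile (fun c => c ≠ ')')
     match r.drop scope.length with
     | ')' :: r2 => if scope.isEmpty then false else pvAltTail r2
     | _ => false)
  | r => pvAltTail r

def pvAltConv (s : String) : Bool :=
  let cs := s.toList
  let run := cs.takeWhile (fun c => 'a' ≤ c && c ≤ 'z')
  if pvAllowedSet.contains run then pvAltAfter (cs.drop run.length) else false

def check_subjects_alt (subjects : List String) : List String :=
  (subjects.filter (fun subject =>
      !(pvIgnoredPrefixes.any (fun p => PySem.Str.startswith subject p)) && !(pvAltConv subject))).map
    (fun subject => "'" ++ subject ++ pvProblemSuffix)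

-- ===== PRECONDITION & SPEC =====
def Spec_check_subjects (subjects : List String) (out : List String) : Prop := out = check_subjects_alt subjects
instance (subjects : List String) (out : List String) : Decidable (Spec_check_subjects subjects out) := by unfold Spec_check_subjects; infer_instance

-- ===== CLAIM (what is proved, stated in full; the proofs are below) =====
def Claim_equal_check_subjects : Prop := ∀ (subjects : List String), Dom_check_subjects subjects → Spec_check_subjects subjects (check_subjects subjects)

-- ===== LEMMAS AND PROOFS =====

-- the lowercase-run predicate of B
def pvLow (c : Char) : Bool := 'a' ≤ c && c ≤ 'z'

lemma pv_drop_takeWhile (p : Char → Bool) (l : List Char) :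
    l.drop (l.takeWhile p).length = l.dropWhile p := by
  induction l with
  | nil => rfl
  | cons a l ih =>
    rw [List.takeWhile_cons, List.dropWhile_cons]
    by_cases h : p a = true <;> simp [h, ih]

lemma pv_singleton_prefix (x : Char) (l : List Char) : [x] <+: l ↔ l.head? = some x := by
  cases l <;> simp [List.cons_prefix_cons, eq_comm]

lemma pv_singleton_infix (x : Char) (l : List Char) : [x] <:+: l ↔ x ∈ l := by
  constructor
  · rintro ⟨u, v, rfl⟩; simp
  · intro h
    obtain ⟨u, v, rfl⟩ := List.append_of_mem h
    exact ⟨u, v, by simp⟩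

lemma pv_colon_spec (r : List Char) :
    (PySem.Chars.startswith r ": ".toList && decide (2 < PySem.Chars.len r)) = pvAltColon r := by
  rcases r with _ | ⟨a, _ | ⟨b, _ | ⟨c, tl⟩⟩⟩
  · decide
  · unfold pvAltColon; split
    · next h => simp at h
    · simp [PySem.Chars.startswith, List.isPrefixOf]
  · unfold pvAltColon; split
    · next h => simp at h
    · simp [PySem.Chars.len]
  · by_cases ha : a = ':'
    · subst ha
      by_cases hb : b = ' '
      · subst hb
        simp [pvAltColon, PySem.Chars.startswith, List.isPrefixOf, PySem.Chars.len]
        omega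
      · have hb' : ((' ' : Char) == b) = false := beq_eq_false_iff_ne.mpr fun h => hb h.symm
        have hsw : PySem.Chars.startswith (':' :: b :: c :: tl) ": ".toList = false := by
          simp [PySem.Chars.startswith, List.isPrefixOf, hb']
        rw [hsw, Bool.false_and]
        unfold pvAltColon; split
        · next h =>
          injection h with _ h2; injection h2 with h2 _
          exact absurd h2 hb
        · rfl
    · have ha' : ((':' : Char) == a) = false := beq_eq_false_iff_ne.mpr fun h => ha h.symm
      have hsw : PySem.Chars.startswith (a :: b :: c :: tl) ": ".toList = false := by
        simp [PySem.Chars.startswith, List.isPrefixOf, ha']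
      rw [hsw, Bool.false_and]
      unfold pvAltColon; split
      · next h => injection h with h1 _; exact absurd h1 ha
      · rfl

lemma pv_not_true {b : Bool} (h : b = false) : ¬ (b = true) := by simp [h]

lemma pv_tail_eq (r : List Char) : pvTailA r = pvAltTail r := by
  rcases r with _ | ⟨a, r⟩
  · decide
  · by_cases ha : a = '!'
    · subst ha
      have hs : PySem.Chars.startswith ('!' :: r) "!".toList = true := by
        simp [PySem.Chars.startswith, List.isPrefixOf]
      simp only [pvTailA]
      rw [if_pos hs]
      simp only [PySem.List.slice_from_one, List.tail_cons]
      rw [pv_colon_spec]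
      rfl
    · have ha' : (('!' : Char) == a) = false := beq_eq_false_iff_ne.mpr fun h => ha h.symm
      have hs : PySem.Chars.startswith (a :: r) "!".toList = false := by
        simp [PySem.Chars.startswith, List.isPrefixOf, ha']
      simp only [pvTailA]
      rw [if_neg (pv_not_true hs), pv_colon_spec]
      unfold pvAltTail; split
      · next h => injection h with h1 _; exact absurd h1 ha
      · rfl

-- any type that matched but is a strict prefix of the lowercase run fails A's body:
-- the next character is a lowercase letter, so neither '(' nor '!' nor ':' follows
lemma pv_body_low (d : Char) (r : List Char) (hd : pvLow d = true) : pvBodyA (d :: r) = false := by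
  have hd' : 'a' ≤ d ∧ d ≤ 'z' := by simpa [pvLow] using hd
  have h1 : (('(' : Char) == d) = false :=
    beq_eq_false_iff_ne.mpr fun h => absurd hd'.1 (by rw [← h]; decide)
  have h2 : (('!' : Char) == d) = false :=
    beq_eq_false_iff_ne.mpr fun h => absurd hd'.1 (by rw [← h]; decide)
  have h3 : ((':' : Char) == d) = false :=
    beq_eq_false_iff_ne.mpr fun h => absurd hd'.1 (by rw [← h]; decide)
  have hs1 : PySem.Chars.startswith (d :: r) "(".toList = false := by
    simp [PySem.Chars.startswith, List.isPrefixOf, h1]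
  have hs2 : PySem.Chars.startswith (d :: r) "!".toList = false := by
    simp [PySem.Chars.startswith, List.isPrefixOf, h2]
  have hs3 : PySem.Chars.startswith (d :: r) ": ".toList = false := by
    simp [PySem.Chars.startswith, List.isPrefixOf, h3]
  simp only [pvBodyA]
  rw [if_neg (pv_not_true hs1)]
  simp only [pvTailA]
  rw [if_neg (pv_not_true hs2), hs3, Bool.false_and]

-- an all-lowercase prefix of cs is a prefix of the lowercase run of cs
lemma pv_prefix_run (t cs : List Char) (ht : t.all pvLow = true) (h : t <+: cs) :
    t <+: cs.takeWhile pvLow := by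
  induction t generalizing cs with
  | nil => exact List.nil_prefix
  | cons a t ih =>
    obtain ⟨u, rfl⟩ := h
    simp only [List.all_cons, Bool.and_eq_true] at ht
    rw [List.cons_append, List.takeWhile_cons, if_pos ht.1]
    exact (List.cons_prefix_cons).mpr ⟨rfl, ih (t ++ u) ht.2 ⟨u, rfl⟩⟩

-- the head of a non-empty dropWhile fails the predicate
lemma pv_dropWhile_cons_head {p : Char → Bool} {l r2 : List Char} {d : Char}
    (h : l.dropWhile p = d :: r2) : p d = false := by
  induction l with
  | nil => simp at h
  | cons a l ih =>
    rw [List.dropWhile_cons] at h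
    by_cases hp : p a = true
    · rw [if_pos hp] at h; exact ih h
    · rw [if_neg hp] at h
      injection h with h1 _
      subst h1
      cases hpa : p a
      · rfl
      · exact absurd hpa hp

-- the index of the first ')' in '(' :: scope ++ ')' :: r2 when scope is ')'-free
lemma pv_find_paren (scope r2 : List Char) (hs : ∀ c ∈ scope, c ≠ ')') :
    PySem.Chars.find ('(' :: (scope ++ ')' :: r2)) ")".toList = (scope.length : Int) + 1 := by
  have hsub : (")" : String).toList = [')'] := by decide
  set l := '(' :: (scope ++ ')' :: r2) with hl
  have hmem : (')' : Char) ∈ l := by rw [hl]; simp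
  rw [hsub]
  have hpos : 0 ≤ PySem.Chars.find l [')'] := by
    rw [PySem.Chars.find_nonneg_iff]
    exact (pv_singleton_infix _ _).mpr hmem
  obtain ⟨hpre, hmin⟩ := PySem.Chars.find_spec hpos
  have hdrop : l.drop (scope.length + 1) = ')' :: r2 := by
    have hl2 : l = ('(' :: scope) ++ (')' :: r2) := by rw [hl]; simp
    rw [hl2, show scope.length + 1 = ('(' :: scope).length from by simp, List.drop_left]
  have hat : [')'] <+: l.drop (scope.length + 1) := by
    rw [hdrop]; exact ⟨r2, rfl⟩
  have hnot : ∀ i, i < scope.length + 1 → ¬ [')'] <+: l.drop i := by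
    intro i hi hpre'
    have hhead : l[i]? = some ')' := by
      have := (pv_singleton_prefix ')' (l.drop i)).mp hpre'
      rwa [List.head?_drop] at this
    rcases i with _ | j
    · rw [hl] at hhead
      simp only [List.getElem?_cons_zero] at hhead
      exact absurd (Option.some.inj hhead) (by decide)
    · have hj : j < scope.length := by omega
      have h2 : l[j + 1]? = scope[j]? := by
        rw [hl]
        simp only [List.getElem?_cons_succ]
        exact List.getElem?_append_left hj
      rw [h2] at hhead
      exact hs ')' (List.mem_of_getElem? hhead) rfl
  have htn : (PySem.Chars.find l [')']).toNat = scope.length + 1 := by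
    rcases Nat.lt_trichotomy (PySem.Chars.find l [')']).toNat (scope.length + 1) with hlt | heq | hgt
    · exact absurd hpre (hnot _ hlt)
    · exact heq
    · exact absurd hat (hmin _ hgt)
  have := Int.toNat_of_nonneg hpos
  omega

lemma pv_after_eq (r : List Char) : pvBodyA r = pvAltAfter r := by
  rcases r with _ | ⟨a, r⟩
  · decide
  · by_cases ha : a = '('
    · subst ha
      have hs : PySem.Chars.startswith ('(' :: r) "(".toList = true := by
        simp [PySem.Chars.startswith, List.isPrefixOf]
      simp only [pvBodyA]
      rw [if_pos hs]
      by_cases hmem : (')' : Char) ∈ r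
      · -- r = scope ++ ')' :: r2 with scope the ')'-free run
        have hdw : r.dropWhile (fun c => decide (c ≠ ')')) ≠ [] := fun hnil => by
          have := List.dropWhile_eq_nil_iff.mp hnil ')' hmem
          simp at this
        obtain ⟨d, r2, hcons⟩ := List.exists_cons_of_ne_nil hdw
        have hd : d = ')' := by
          have := pv_dropWhile_cons_head hcons
          simpa using this
        subst hd
        set scope := r.takeWhile (fun c => decide (c ≠ ')')) with hscope
        have hsplit : r = scope ++ ')' :: r2 := by
          conv_lhs => rw [← List.takeWhile_append_dropWhile
            (p := fun c => decide (c ≠ ')')) (l := r)]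
          rw [← hscope, hcons]
        have hsc : ∀ c ∈ scope, c ≠ ')' := by
          intro c hc
          rw [hscope] at hc
          simpa using List.mem_takeWhile_imp hc
        have hfind : PySem.Chars.find ('(' :: r) ")".toList = (scope.length : Int) + 1 := by
          conv_lhs => rw [hsplit]
          exact pv_find_paren _ r2 hsc
        have hBdrop : r.drop scope.length = ')' :: r2 := by
          rw [hscope, pv_drop_takeWhile, hcons]
        have hB : pvAltAfter ('(' :: r) =
            (if scope.isEmpty then false else pvAltTail r2) := by
          simp only [pvAltAfter, ← hscope]
          simp only [hBdrop]
        rw [hB, hfind]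
        by_cases hempty : scope = []
        · rw [hempty]
          simp
        · have hlen : scope.length ≠ 0 := fun h => hempty (List.eq_nil_of_length_eq_zero h)
          rw [if_neg (by omega), if_neg (by simp [List.isEmpty_iff, hempty])]
          have hslice : PySem.List.slice ('(' :: r)
              (some ((scope.length : Int) + 1 + 1)) none = r2 := by
            have hcast : ((scope.length : Int) + 1 + 1) = ((scope.length + 2 : Nat) : Int) := by
              push_cast; ring
            rw [hcast, PySem.List.slice_from_natCast]
            conv_lhs => rw [hsplit]
            rw [show ('(' :: (scope ++ ')' :: r2)) = ('(' :: scope ++ [')']) ++ r2 from by simp]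
            rw [show scope.length + 2 = ('(' :: scope ++ [')']).length from by simp]
            exact List.drop_left
          rw [hslice, pv_tail_eq]
      · -- no ')' at all: find = -1, and B's scan exhausts r
        have hfind : PySem.Chars.find ('(' :: r) ")".toList = -1 := by
          have hn : ¬ ((')' : Char) ∈ '(' :: r) := by
            simp only [List.mem_cons]
            rintro (h | h)
            · exact absurd h (by decide)
            · exact hmem h
          rw [show (")" : String).toList = [')'] from by decide,
            PySem.Chars.find_eq_neg_one_iff, pv_singleton_infix]
          exact hn
        have hnil : r.dropWhile (fun c => decide (c ≠ ')')) = [] := by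
          rw [List.dropWhile_eq_nil_iff]
          intro x hx
          simp only [decide_eq_true_eq]
          rintro rfl
          exact hmem hx
        have hB : pvAltAfter ('(' :: r) = false := by
          simp only [pvAltAfter]
          rw [pv_drop_takeWhile]
          simp only [hnil]
        rw [hfind, hB, if_pos (by decide)]
    · have ha' : (('(' : Char) == a) = false := beq_eq_false_iff_ne.mpr fun h => ha h.symm
      have hs : PySem.Chars.startswith (a :: r) "(".toList = false := by
        simp [PySem.Chars.startswith, List.isPrefixOf, ha']
      simp only [pvBodyA]
      rw [if_neg (pv_not_true hs), pv_tail_eq]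
      have e2 : pvAltAfter (a :: r) = pvAltTail (a :: r) := by
        unfold pvAltAfter; split
        · next h => injection h with h1 _; exact absurd h1 ha
        · rfl
      rw [e2]

-- A's loop over an all-lowercase prefix-antichain of types = one run lookup + the body
lemma pv_loopA_char (cs : List Char) (ts : List String)
    (hlow : ∀ t ∈ ts, t.toList.all pvLow = true)
    (hanti : ∀ t ∈ ts, ∀ t' ∈ ts, t.toList <+: t'.toList → t = t') :
    pvConvLoopA cs ts =
      if (cs.takeWhile pvLow) ∈ ts.map (fun t => t.toList) then
        pvBodyA (cs.drop (cs.takeWhile pvLow).length)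
      else false := by
  induction ts with
  | nil => simp [pvConvLoopA]
  | cons t ts ih =>
    have hlow_t : t.toList.all pvLow = true := hlow t (by simp)
    by_cases hsw : PySem.Chars.startswith cs t.toList = true
    · have hpre : t.toList <+: cs := (PySem.Chars.startswith_iff _ _).mp hsw
      have hrun : t.toList <+: cs.takeWhile pvLow := pv_prefix_run _ _ hlow_t hpre
      have hloop : pvConvLoopA cs (t :: ts) =
          pvBodyA (PySem.List.slice cs (some (PySem.Chars.len t.toList)) none) := by
        simp [pvConvLoopA, hsw]
      have hslice : PySem.List.slice cs (some (PySem.Chars.len t.toList)) none =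
          cs.drop t.toList.length := by
        rw [show PySem.Chars.len t.toList = ((t.toList.length : Nat) : Int) from rfl,
          PySem.List.slice_from_natCast]
      by_cases heq : t.toList = cs.takeWhile pvLow
      · rw [hloop, hslice, heq,
          if_pos (by simp only [List.map_cons, List.mem_cons]; exact Or.inl heq.symm)]
      · obtain ⟨u, hu⟩ := hrun
        have hune : u ≠ [] := by
          rintro rfl
          rw [List.append_nil] at hu
          exact heq hu
        obtain ⟨d, u', rfl⟩ := List.exists_cons_of_ne_nil hune
        have hdlow : pvLow d = true :=
          List.mem_takeWhile_imp (p := pvLow) (l := cs) (by rw [← hu]; simp)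
        obtain ⟨w, hw⟩ := List.takeWhile_prefix (l := cs) pvLow
        have hdropA : cs.drop t.toList.length = d :: (u' ++ w) := by
          rw [show cs = t.toList ++ (d :: (u' ++ w)) from by rw [← hw, ← hu]; simp,
            List.drop_left]
        have hnotmem : ¬ cs.takeWhile pvLow ∈ (t :: ts).map (fun t => t.toList) := by
          intro hm
          simp only [List.map_cons, List.mem_cons, List.mem_map] at hm
          rcases hm with h | ⟨t', ht', ht'eq⟩
          · exact heq h.symm
          · have hpp : t.toList <+: t'.toList := by rw [ht'eq, ← hu]; exact ⟨d :: u', by simp⟩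
            have hts : t = t' := hanti t (by simp) t' (by simp [ht']) hpp
            subst hts
            exact heq (by rw [ht'eq, ← hu])
        rw [hloop, hslice, hdropA, pv_body_low d _ hdlow, if_neg hnotmem]
    · have hloop : pvConvLoopA cs (t :: ts) = pvConvLoopA cs ts := by
        simp [pvConvLoopA, hsw]
      have hne : cs.takeWhile pvLow ≠ t.toList := by
        intro h
        apply hsw
        rw [PySem.Chars.startswith_iff, ← h]
        exact List.takeWhile_prefix _
      rw [hloop, ih (fun t' ht' => hlow t' (List.mem_cons_of_mem _ ht'))
        (fun t1 h1 t2 h2 h12 =>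
          hanti t1 (List.mem_cons_of_mem _ h1) t2 (List.mem_cons_of_mem _ h2) h12)]
      by_cases hm : cs.takeWhile pvLow ∈ ts.map (fun t => t.toList)
      · rw [if_pos hm, if_pos (by simp only [List.map_cons, List.mem_cons]; exact Or.inr hm)]
      · have hnotmem : ¬ cs.takeWhile pvLow ∈ (t :: ts).map (fun t => t.toList) := by
          simp only [List.map_cons, List.mem_cons]
          rintro (h | h)
          · exact hne h
          · exact hm h
        rw [if_neg hm, if_neg hnotmem]

lemma pv_conv_eq (s : String) : is_conventional_subject s = pvAltConv s := by
  have hlow : ∀ t ∈ pvAllowedTypes, t.toList.all pvLow = true := by decide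
  have hanti : ∀ t ∈ pvAllowedTypes, ∀ t' ∈ pvAllowedTypes, t.toList <+: t'.toList → t = t' := by
    decide
  show pvConvLoopA s.toList pvAllowedTypes = pvAltConv s
  rw [pv_loopA_char s.toList pvAllowedTypes hlow hanti]
  show (if s.toList.takeWhile pvLow ∈ pvAllowedTypes.map (fun t => t.toList) then
      pvBodyA (s.toList.drop (s.toList.takeWhile pvLow).length) else false) =
    (if pvAllowedSet.contains (s.toList.takeWhile pvLow) = true then
      pvAltAfter (s.toList.drop (s.toList.takeWhile pvLow).length) else false)
  by_cases hm : s.toList.takeWhile pvLow ∈ pvAllowedTypes.map (fun t => t.toList)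
  · rw [if_pos hm, pv_after_eq,
      if_pos (show pvAllowedSet.contains (s.toList.takeWhile pvLow) = true from
        List.contains_iff_mem.mpr hm)]
  · rw [if_neg hm,
      if_neg (show ¬ pvAllowedSet.contains (s.toList.takeWhile pvLow) = true from
        fun h => hm (List.contains_iff_mem.mp h))]

set_option maxRecDepth 8192 in
lemma pv_msg_eq (s : String) :
    ("'" ++ s ++ "' is not a conventional commit subject. Expected one of: " ++
        PySem.Str.join ", " pvAllowedTypes ++ ". Example: fix(ci): describe the change") =
      "'" ++ s ++ pvProblemSuffix := by
  apply String.ext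
  simp only [String.toList_append, List.append_assoc]
  refine congrArg _ (congrArg _ ?_)
  decide

-- ===== VERDICT (by name: the statement is the Claim_ definition above) =====
theorem check_subjects_spec : Claim_equal_check_subjects := by
  intro subjects _
  unfold Spec_check_subjects check_subjects check_subjects_alt
  have hstep : ∀ (acc : List String) (x : String),
      (if is_ignored_subject x then acc
       else if !(is_conventional_subject x) then
        acc ++
          ["'" ++ x ++ "' is not a conventional commit subject. Expected one of: " ++
            PySem.Str.join ", " pvAllowedTypes ++ ". Example: fix(ci): describe the change"]
       else acc) =
      (if (!(pvIgnoredPrefixes.any (fun p => PySem.Str.startswith x p)) && !(pvAltConv x)) then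
        acc ++ ["'" ++ x ++ pvProblemSuffix] else acc) := by
    intro acc x
    rw [pv_msg_eq x]
    show (if is_ignored_subject x then acc else _) = _
    unfold is_ignored_subject
    cases h1 : pvIgnoredPrefixes.any (fun p => PySem.Str.startswith x p) <;>
      cases h2 : pvAltConv x <;> simp [pv_conv_eq, h2]
  calc subjects.foldl _ [] = subjects.foldl
        (fun acc x => if (!(pvIgnoredPrefixes.any (fun p => PySem.Str.startswith x p)) && !(pvAltConv x))
          then acc ++ ["'" ++ x ++ pvProblemSuffix] else acc) [] := by
          exact PySem.List.foldl_congr_mem _ _ _ _ (fun acc x _ => hstep acc x)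
    _ = _ := by
          rw [PySem.List.foldl_append_if
            (fun x => (!(pvIgnoredPrefixes.any (fun p => PySem.Str.startswith x p)) && !(pvAltConv x)))
            (fun x => "'" ++ x ++ pvProblemSuffix) subjects []]
          simp
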